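-- pv_equiv track=rewrite | github.com/mlforcada/Appraise | eval/kw_gen.py | lemmatize
-- ===== SOURCE A (Python) =====
-- def lemmatize(data):
--     dictionary = {}
--     for item in data:
--         form = item[0]
--         try:
--             lemma = item[1][0]
--         except IndexError:  # the word didn't parse, use marked form instead
--             lemma = '*'+form
--         try:
--             if form not in dictionary[lemma]:
--                 dictionary[lemma].append(form)
--         except KeyError:
--             dictionary[lemma] = [form]
--     return dictionary
-- ===== SOURCE B (Python) =====
-- def lemmatize(data):
--     grouped = {}
--     for item in data:
--         form = item[0]
--         try:
--             lemma = item[1][0]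
--         except IndexError:  # the word didn't parse, use marked form instead
--             lemma = '*' + form
--         grouped.setdefault(lemma, []).append(form)
--     return {lemma: list(dict.fromkeys(forms)) for lemma, forms in grouped.items()}
-- ===== Notes on version B (the rewrite author's own statement) =====
-- stated objective: alternative
-- what changed: A deduplicates as it goes with a membership test and try/except-KeyError branching inside the loop; B collects all forms per lemma in one setdefault/append pass and deduplicates each group afterwards with dict.fromkeys.
import Mathlib
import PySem

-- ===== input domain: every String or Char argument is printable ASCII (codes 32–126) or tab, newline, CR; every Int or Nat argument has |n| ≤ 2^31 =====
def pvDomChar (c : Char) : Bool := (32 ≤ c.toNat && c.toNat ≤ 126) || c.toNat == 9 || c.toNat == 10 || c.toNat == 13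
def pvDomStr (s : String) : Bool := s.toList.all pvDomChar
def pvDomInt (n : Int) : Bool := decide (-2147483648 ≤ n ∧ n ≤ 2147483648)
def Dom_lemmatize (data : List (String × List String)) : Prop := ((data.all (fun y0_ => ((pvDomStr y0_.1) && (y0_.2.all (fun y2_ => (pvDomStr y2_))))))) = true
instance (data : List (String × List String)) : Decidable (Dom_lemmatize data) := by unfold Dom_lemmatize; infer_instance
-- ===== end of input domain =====

-- B collects all forms per lemma first and deduplicates each group afterwards; A deduplicates inside its loop.
-- Equivalence of the return value is proved (Python B builds a fresh dict; neither mutates its argument).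

-- ===== PORT A =====
-- item[1][0] with IndexError caught -> '*'+form
def lemOf (item : String × List String) : String :=
  match PySem.List.pyGet? item.2 0 with
  | some l => l
  | none => "*" ++ item.1

def lemmatize (data : List (String × List String)) : List (String × List String) :=
  (data.foldl (fun dict item =>
      let form := item.1
      let lem := lemOf item
      match dict.get? lem with
      | some forms => if forms.contains form then dict else dict.insert lem (forms ++ [form])
      | none => dict.insert lem [form]) PySem.Dict.empty).items

-- ===== PORT B =====
def lemmatize_alt (data : List (String × List String)) : List (String × List String) :=
  let grouped := data.foldl (fun d item =>
      d.modify (lemOf item) [] (· ++ [item.1])) PySem.Dict.empty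
  grouped.items.map (fun p => (p.1, PySem.List.dedup p.2))

-- ===== PRECONDITION & SPEC =====
def Spec_lemmatize (data : List (String × List String)) (out : List (String × List String)) : Prop := out = lemmatize_alt data
instance (data : List (String × List String)) (out : List (String × List String)) : Decidable (Spec_lemmatize data out) := by unfold Spec_lemmatize; infer_instance

-- ===== CLAIM (what is proved, stated in full; the proofs are below) =====
def Claim_equal_lemmatize : Prop := ∀ (data : List (String × List String)), Dom_lemmatize data → Spec_lemmatize data (lemmatize data)

-- ===== LEMMAS AND PROOFS =====

-- mapDedup: apply first-occurrence dedup to every value of a dict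
def mapDedup (d : PySem.Dict String (List String)) : PySem.Dict String (List String) :=
  PySem.Dict.mk (d.items.map (fun p => (p.1, PySem.List.dedup p.2)))

theorem contains_mapDedup (d : PySem.Dict String (List String)) (k : String) :
    (mapDedup d).contains k = d.contains k := by
  simp only [mapDedup, PySem.Dict.contains, List.any_map]
  congr 1

theorem get?_mapDedup (d : PySem.Dict String (List String)) (k : String) :
    (mapDedup d).get? k = (d.get? k).map PySem.List.dedup := by
  simp only [mapDedup, PySem.Dict.get?, List.find?_map]
  have hc : ((fun p => (p.1 == k : Bool)) ∘ (fun p : String × List String => (p.1, PySem.List.dedup p.2))) = fun p => (p.1 == k : Bool) := rfl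
  rw [hc]
  cases List.find? (fun p => (p.1 == k : Bool)) d.items <;> rfl

theorem mapDedup_insert (d : PySem.Dict String (List String)) (k : String) (v : List String) :
    mapDedup (d.insert k v) = (mapDedup d).insert k (PySem.List.dedup v) := by
  unfold mapDedup PySem.Dict.insert
  rw [show (PySem.Dict.mk (d.items.map (fun p => (p.1, PySem.List.dedup p.2)))).contains k = d.contains k from contains_mapDedup d k]
  by_cases h : d.contains k = true
  · simp only [h, if_pos, List.map_map]
    congr 1
    apply List.map_congr_left
    intro p _
    by_cases hp : (p.1 == k : Bool) = true <;> simp [Function.comp, hp]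
  · simp [h]

theorem dedup_append_singleton (l : List String) (x : String) :
    PySem.List.dedup (l ++ [x]) =
      if (PySem.List.dedup l).contains x then PySem.List.dedup l else PySem.List.dedup l ++ [x] := by
  simp only [PySem.List.dedup, PySem.Set.ofList, List.foldl_append, List.foldl_cons, List.foldl_nil]
  rfl

theorem insert_self_of_get? (d : PySem.Dict String (List String)) (k : String) (v : List String)
    (hnd : d.keys.Nodup) (h : d.get? k = some v) : d.insert k v = d := by
  have hc : d.contains k = true := by
    rw [PySem.Dict.contains_eq_isSome_get?, h]; rfl
  apply PySem.Dict.ext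
  rw [PySem.Dict.items_insert_of_contains _ _ hc]
  clear hc
  obtain ⟨l⟩ := d
  simp only [PySem.Dict.keys] at hnd
  simp only [PySem.Dict.get?] at h
  induction l with
  | nil => simp at h
  | cons a t ih =>
    simp only [List.map_cons, List.nodup_cons] at hnd
    by_cases ha : (a.1 == k : Bool) = true
    · have hak : a.1 = k := eq_of_beq ha
      have hav : a.2 = v := by simpa [List.find?_cons, ha] using h
      have hnk : ∀ p ∈ t, p.1 ≠ k := by
        intro p hp hpk
        exact hnd.1 (by rw [hak]; exact List.mem_map.mpr ⟨p, hp, hpk⟩)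
      simp only [List.map_cons, ha, if_pos]
      refine congrArg₂ List.cons ?_ ?_
      · rw [← hak, ← hav]
      · have hid : ∀ p ∈ t, (if (p.1 == k : Bool) = true then (k, v) else p) = id p := by
          intro p hp
          have hpf : (p.1 == k : Bool) = false := beq_eq_false_iff_ne.mpr (hnk p hp)
          simp [hpf]
        rw [List.map_congr_left hid, List.map_id]
    · have h' : Option.map (fun x => x.2) (List.find? (fun p => (p.1 == k : Bool)) t) = some v := by
        simpa [List.find?_cons, ha] using h
      simp only [List.map_cons, ha]
      rw [ih hnd.2 h']
      simp

theorem step_comm (d : PySem.Dict String (List String)) (hnd : d.keys.Nodup)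
    (item : String × List String) :
    (match (mapDedup d).get? (lemOf item) with
      | some forms => if forms.contains item.1 then mapDedup d
          else (mapDedup d).insert (lemOf item) (forms ++ [item.1])
      | none => (mapDedup d).insert (lemOf item) [item.1]) =
    mapDedup (d.modify (lemOf item) [] (· ++ [item.1])) := by
  rw [get?_mapDedup]
  unfold PySem.Dict.modify
  rw [PySem.Dict.getD_eq_get?_getD]
  cases h : d.get? (lemOf item) with
  | none =>
    simp only [Option.map_none, Option.getD_none]
    rw [mapDedup_insert]
    rfl
  | some forms =>
    simp only [Option.map_some, Option.getD_some]
    rw [mapDedup_insert, dedup_append_singleton]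
    by_cases hc : (PySem.List.dedup forms).contains item.1 = true
    · simp only [hc, if_pos]
      rw [insert_self_of_get? (mapDedup d) (lemOf item) (PySem.List.dedup forms)
            (by simpa [mapDedup, PySem.Dict.keys, List.map_map, Function.comp] using hnd)
            (by rw [get?_mapDedup, h]; rfl)]
    · have hm : item.1 ∉ forms := by
        simpa [List.contains_eq_mem, PySem.List.mem_dedup] using hc
      simp [hm]

theorem fold_comm (l : List (String × List String)) (d : PySem.Dict String (List String))
    (hnd : d.keys.Nodup) :
    l.foldl (fun dict item =>
      match dict.get? (lemOf item) with
      | some forms => if forms.contains item.1 then dict else dict.insert (lemOf item) (forms ++ [item.1])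
      | none => dict.insert (lemOf item) [item.1]) (mapDedup d) =
    mapDedup (l.foldl (fun d item => d.modify (lemOf item) [] (· ++ [item.1])) d) := by
  induction l generalizing d with
  | nil => rfl
  | cons a t ih =>
    simp only [List.foldl_cons]
    rw [step_comm d hnd a]
    exact ih _ (PySem.Dict.nodup_keys_insert _ _ _ hnd)

-- ===== VERDICT (by name: the statement is the Claim_ definition above) =====
theorem lemmatize_spec : Claim_equal_lemmatize := by
  intro data _
  show lemmatize data = lemmatize_alt data
  have hme : mapDedup PySem.Dict.empty = PySem.Dict.empty := rfl
  have h := fold_comm data PySem.Dict.empty PySem.Dict.nodup_keys_empty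
  rw [hme] at h
  unfold lemmatize lemmatize_alt
  rw [h]
  rfl
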